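-- pv_equiv track=rewrite | github.com/PaulaB03/Sortari | Sortari.py | Radix_word
-- ===== SOURCE A (Python) =====
-- def Radix_word(L, n, k):
--     aux = [0] * n
--     fr = [0] * 52
--
--     for item in L:
--         index = min(len(item) - 1, k)
--         letter = ord(item[-(index + 1)]) - 65
--         if letter > 25:
--             letter -= 6
--         fr[letter] += 1
--
--     for i in range(51):
--         fr[i + 1] += fr[i]
--
--     for i in range(n - 1, -1, -1):
--         item = L[i]
--         index = min(len(item) - 1, k)
--         letter = ord(item[-(index + 1)]) - 65
--         if letter > 25:
--             letter -= 6
--         aux[fr[letter] - 1] = item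
--         fr[letter] -= 1
--
--     return aux
-- ===== SOURCE B (Python) =====
-- def Radix_word(L, n, k):
--     # Bucket sort: one stable forward pass into 52 buckets, then concatenate.
--     buckets = [[] for _ in range(52)]
--     for i in range(n):
--         item = L[i]
--         index = min(len(item) - 1, k)
--         letter = ord(item[-(index + 1)]) - 65
--         if letter > 25:
--             letter -= 6
--         buckets[letter].append(item)
--     out = []
--     for b in buckets:
--         out += b
--     return out
-- ===== Notes on version B (the rewrite author's own statement) =====
-- stated objective: simpler
-- what changed: Replaces the three-pass counting sort (frequency count, cumulative sums, backward placement into a preallocated array) by a single stable forward pass appending each word into one of 52 buckets followed by concatenating the buckets.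
-- outside the precondition, e.g. on Radix_word(['a', 'b'], 1, 0): A returns ['a'], B returns ['a']
import Mathlib
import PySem

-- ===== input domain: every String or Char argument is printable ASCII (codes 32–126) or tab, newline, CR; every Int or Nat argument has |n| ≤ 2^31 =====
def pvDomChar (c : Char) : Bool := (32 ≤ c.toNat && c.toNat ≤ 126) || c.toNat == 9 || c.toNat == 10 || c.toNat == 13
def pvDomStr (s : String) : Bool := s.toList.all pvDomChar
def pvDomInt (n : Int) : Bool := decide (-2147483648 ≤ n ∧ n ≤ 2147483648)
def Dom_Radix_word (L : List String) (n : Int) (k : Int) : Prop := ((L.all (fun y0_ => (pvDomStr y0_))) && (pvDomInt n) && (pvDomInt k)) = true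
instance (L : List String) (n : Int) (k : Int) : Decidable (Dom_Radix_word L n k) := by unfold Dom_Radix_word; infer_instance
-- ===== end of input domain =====

-- B replaces A's three-pass counting sort by a single stable bucket pass (52 buckets) plus
-- concatenation: a simpler algorithm with the same result and cost.

-- Shared helper: both Python sources contain the identical three lines
--   index = min(len(item) - 1, k); letter = ord(item[-(index + 1)]) - 65; if letter > 25: letter -= 6
-- The out-of-range access item[-(index+1)] (IndexError in Python) is rendered 0; Pre_ excludes it.
def pvLetter (k : Int) (item : String) : Int :=
  let index : Int := min (PySem.Str.len item - 1) k
  match PySem.Str.pyGet? item (-(index + 1)) with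
  | some c =>
      let letter : Int := (c.toNat : Int) - 65
      if letter > 25 then letter - 6 else letter
  | none => 0

-- ===== PORT A =====
-- counting sort: frequency pass, cumulative pass, backward placement pass.
-- aux = [0] * n holds int placeholders; they are rendered "" (under Pre_ every slot is overwritten).
def Radix_word (L : List String) (n : Int) (k : Int) : List String :=
  let aux : List String := List.replicate n.toNat ""
  let fr : List Int := List.replicate 52 0
  let fr := L.foldl (fun fr item =>
    let letter := pvLetter k item
    PySem.List.pySetD fr letter (PySem.List.pyGetD fr letter 0 + 1)) fr
  let fr := (PySem.List.pyRange 0 51).foldl (fun fr i =>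
    PySem.List.pySetD fr (i + 1) (PySem.List.pyGetD fr (i + 1) 0 + PySem.List.pyGetD fr i 0)) fr
  let st := (PySem.List.pyRange (n - 1) (-1) (-1)).foldl (fun st i =>
    let item := PySem.List.pyGetD L i ""
    let letter := pvLetter k item
    let p := PySem.List.pyGetD st.2 letter 0 - 1
    (PySem.List.pySetD st.1 p item, PySem.List.pySetD st.2 letter p)) (aux, fr)
  st.1

-- ===== PORT B =====
-- bucket sort: one stable forward pass appending into 52 buckets, then concatenation.
def Radix_word_alt (L : List String) (n : Int) (k : Int) : List String :=
  let buckets : List (List String) := List.replicate 52 []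
  let buckets := (PySem.List.pyRange 0 n).foldl (fun bs i =>
    let item := PySem.List.pyGetD L i ""
    let letter := pvLetter k item
    PySem.List.pySetD bs letter (PySem.List.pyGetD bs letter [] ++ [item])) buckets
  buckets.foldl (fun out b => out ++ b) []

-- ===== PRECONDITION & SPEC =====
-- true iff the character A selects from item exists and its code is in 13..122,
-- i.e. the (possibly negative) letter index stays inside the 52-slot frequency list.
def pvOkChar (k : Int) (item : String) : Bool :=
  match PySem.Str.pyGet? item (-(min (PySem.Str.len item - 1) k + 1)) with
  | some c => 13 ≤ c.toNat && c.toNat ≤ 122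
  | none => false

-- Pre_ excludes inputs with 0 < n ≠ len(L) and inputs whose selected character is missing
-- (empty word / bad k) or has code outside 13..122: there A raises IndexError, except the
-- accidental corner of a prefix whose full-list ranks happen to fit, where A and B agree anyway.
def Pre_Radix_word (L : List String) (n : Int) (k : Int) : Prop :=
  (n = (L.length : Int) ∨ n ≤ 0) ∧ ∀ item ∈ L, pvOkChar k item = true
instance (L : List String) (n : Int) (k : Int) : Decidable (Pre_Radix_word L n k) := by
  unfold Pre_Radix_word; infer_instance

def pvWitness_Radix_word : List String × Int × Int := (["ba", "ab", "Zz", "a!"], 4, 0)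

def Spec_Radix_word (L : List String) (n : Int) (k : Int) (out : List String) : Prop := out = Radix_word_alt L n k
instance (L : List String) (n : Int) (k : Int) (out : List String) : Decidable (Spec_Radix_word L n k out) := by unfold Spec_Radix_word; infer_instance

-- ===== CLAIM (what is proved, stated in full; the proofs are below) =====
def Claim_equal_Radix_word : Prop := ∀ (L : List String) (n : Int) (k : Int), Dom_Radix_word L n k → Pre_Radix_word L n k → Spec_Radix_word L n k (Radix_word L n k)

-- ===== LEMMAS AND PROOFS =====

-- the bucket index (0..51) that the in-range letter denotes under Python's negative-index rule
def pvB (k : Int) (s : String) : Nat := (pvLetter k s % 52).toNat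

-- the items of L that fall into bucket b, in order
def pvF (k : Int) (b : Nat) (L : List String) : List String := L.filter (fun s => pvB k s == b)

-- number of items in buckets 0..m-1 (start offset of bucket m in the output)
def pvS (k : Int) (L : List String) (m : Nat) : Nat := ∑ c ∈ Finset.range m, (pvF k c L).length

lemma pvB_lt (k : Int) (s : String) : pvB k s < 52 := by
  have h := Int.emod_lt_of_pos (pvLetter k s) (b := 52) (by norm_num)
  have h0 := Int.emod_nonneg (pvLetter k s) (b := 52) (by norm_num)
  unfold pvB; omega

lemma pvS_mono (k : Int) (L : List String) {a b : Nat} (h : a ≤ b) : pvS k L a ≤ pvS k L b := by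
  unfold pvS
  apply Finset.sum_le_sum_of_subset
  intro x hx
  simp only [Finset.mem_range] at *
  omega


lemma pvS_succ (k : Int) (L : List String) (m : Nat) :
    pvS k L (m + 1) = pvS k L m + (pvF k m L).length := by
  unfold pvS; rw [Finset.sum_range_succ]


lemma pvS_top (k : Int) (L : List String) : pvS k L 52 = L.length := by
  induction L with
  | nil => simp [pvS, pvF]
  | cons x L ih =>
      unfold pvS at *
      have hF : ∀ c, (pvF k c (x :: L)).length
          = (pvF k c L).length + (if pvB k x = c then 1 else 0) := by
        intro c
        unfold pvF
        rw [List.filter_cons]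
        by_cases hc : pvB k x = c
        · simp [hc]
        · simp [hc]
      simp only [hF]
      rw [Finset.sum_add_distrib, ih, Finset.sum_ite_eq (Finset.range 52) (pvB k x)]
      simp [Finset.mem_range.mpr (pvB_lt k x)]



lemma pvOk_range {k : Int} {s : String} (h : pvOkChar k s = true) :
    -52 ≤ pvLetter k s ∧ pvLetter k s ≤ 51 := by
  unfold pvOkChar at h
  rcases hc : PySem.Str.pyGet? s (-(min (PySem.Str.len s - 1) k + 1)) with _ | c
  · rw [hc] at h; simp at h
  · rw [hc] at h
    simp only [Bool.and_eq_true, decide_eq_true_eq] at h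
    simp only [pvLetter, hc]
    split <;> omega

-- Python's fr[letter] for a length-52 list and -52 ≤ letter ≤ 51 is fr[letter % 52]
lemma pvGet_bridge {α : Type} (fr : List α) (hl : fr.length = 52) {i : Int}
    (h1 : -52 ≤ i) (h2 : i ≤ 51) (d : α) :
    PySem.List.pyGetD fr i d = fr.getD (i % 52).toNat d := by
  by_cases h0 : 0 ≤ i
  · rw [PySem.List.pyGetD_of_nonneg fr d h0]
    congr 1
    omega
  · simp only [PySem.List.pyGetD, PySem.List.pyGet?, PySem.List.pyIdx?, hl]
    have hle : -((52:Nat):Int) ≤ i := by push_cast; omega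
    have hidx : 52 - (-i).toNat = (i % 52).toNat := by omega
    rw [if_neg h0, if_pos hle]
    simp only [Option.bind, hidx, List.getD_eq_getElem?_getD]

lemma pvSet_bridge {α : Type} (fr : List α) (hl : fr.length = 52) {i : Int}
    (h1 : -52 ≤ i) (h2 : i ≤ 51) (v : α) :
    PySem.List.pySetD fr i v = fr.set (i % 52).toNat v := by
  by_cases h0 : 0 ≤ i
  · rw [PySem.List.pySetD_of_nonneg fr v h0]
    congr 1
    omega
  · simp only [PySem.List.pySetD, PySem.List.pySet?, PySem.List.pyIdx?, hl]
    have hle : -((52:Nat):Int) ≤ i := by push_cast; omega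
    have hidx : 52 - (-i).toNat = (i % 52).toNat := by omega
    rw [if_neg h0, if_pos hle]
    simp only [Option.map, hidx, Option.getD_some]

lemma pvGetD_set {α : Type} (l : List α) (i j : Nat) (v d : α) :
    (l.set i v).getD j d = if i = j ∧ i < l.length then v else l.getD j d := by
  simp only [List.getD_eq_getElem?_getD, List.getElem?_set]
  by_cases hij : i = j
  · subst hij
    by_cases hil : i < l.length
    · simp [hil]
    · simp [hil]
  · simp [hij]

-- counting pass: adds each item's bucket count
lemma pvCount (k : Int) :
    ∀ (M : List String) (fr : List Int), fr.length = 52 →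
      (∀ s ∈ M, pvOkChar k s = true) →
      (M.foldl (fun fr item =>
        let letter := pvLetter k item
        PySem.List.pySetD fr letter (PySem.List.pyGetD fr letter 0 + 1)) fr).length = 52 ∧
      ∀ b, b < 52 →
        (M.foldl (fun fr item =>
          let letter := pvLetter k item
          PySem.List.pySetD fr letter (PySem.List.pyGetD fr letter 0 + 1)) fr).getD b 0
          = fr.getD b 0 + ((pvF k b M).length : Int) := by
  intro M
  induction M with
  | nil =>
      intro fr hl _
      refine ⟨hl, fun b _ => ?_⟩
      simp [pvF]
  | cons x M ih =>
      intro fr hl hok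
      have hokx : pvOkChar k x = true := hok x (List.mem_cons_self)
      have hr := pvOk_range hokx
      have hblt : pvB k x < 52 := pvB_lt k x
      simp only [List.foldl_cons]
      rw [pvGet_bridge fr hl hr.1 hr.2, pvSet_bridge fr hl hr.1 hr.2]
      have hl' : (fr.set (pvLetter k x % 52).toNat (fr.getD (pvLetter k x % 52).toNat 0 + 1)).length = 52 := by
        simp [hl]
      obtain ⟨ihl, ihv⟩ := ih _ hl' (fun s hs => hok s (List.mem_cons_of_mem _ hs))
      refine ⟨ihl, fun b hb => ?_⟩
      rw [ihv b hb, pvGetD_set]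
      have hFc : pvF k b (x :: M) = if pvB k x == b then x :: pvF k b M else pvF k b M := by
        unfold pvF
        rw [List.filter_cons]
      have hB : (pvLetter k x % 52).toNat = pvB k x := rfl
      rw [hB, hFc]
      by_cases hbx : pvB k x = b
      · subst hbx
        rw [if_pos ⟨rfl, by omega⟩, if_pos (by simp)]
        simp
        omega
      · rw [if_neg (by tauto), if_neg (by simp [hbx])]


-- cumulative pass
lemma pvCum (k : Int) (L : List String) (fr : List Int) (hl : fr.length = 52)
    (hv : ∀ b, b < 52 → fr.getD b 0 = ((pvF k b L).length : Int)) :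
    ((PySem.List.pyRange 0 51).foldl (fun fr i =>
      PySem.List.pySetD fr (i + 1) (PySem.List.pyGetD fr (i + 1) 0 + PySem.List.pyGetD fr i 0)) fr).length = 52 ∧
    ∀ b, b < 52 →
      ((PySem.List.pyRange 0 51).foldl (fun fr i =>
        PySem.List.pySetD fr (i + 1) (PySem.List.pyGetD fr (i + 1) 0 + PySem.List.pyGetD fr i 0)) fr).getD b 0
        = (pvS k L (b + 1) : Int) := by
  have main : ∀ m, m ≤ 51 →
      ((List.range m).foldl (fun (fr : List Int) (j : Nat) =>
        PySem.List.pySetD fr ((j : Int) + 1)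
          (PySem.List.pyGetD fr ((j : Int) + 1) 0 + PySem.List.pyGetD fr (j : Int) 0)) fr).length = 52 ∧
      ∀ b, b < 52 →
        ((List.range m).foldl (fun (fr : List Int) (j : Nat) =>
          PySem.List.pySetD fr ((j : Int) + 1)
            (PySem.List.pyGetD fr ((j : Int) + 1) 0 + PySem.List.pyGetD fr (j : Int) 0)) fr).getD b 0
          = if b ≤ m then (pvS k L (b + 1) : Int) else ((pvF k b L).length : Int) := by
    intro m
    induction m with
    | zero =>
        intro _
        refine ⟨hl, fun b hb => ?_⟩
        simp only [List.range_zero, List.foldl_nil]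
        by_cases hb0 : b = 0
        · subst hb0
          rw [if_pos (le_refl 0), hv 0 (by omega)]
          rw [show pvS k L 1 = (pvF k 0 L).length from by rw [pvS_succ]; simp [pvS]]
        · rw [if_neg (by omega), hv b hb]
    | succ m ih =>
        intro hm
        obtain ⟨ihl, ihv⟩ := ih (by omega)
        rw [List.range_succ, List.foldl_append, List.foldl_cons, List.foldl_nil]
        have hcast : ((m : Int) + 1) = (((m + 1 : Nat)) : Int) := by push_cast; ring
        rw [hcast, PySem.List.pySetD_natCast, PySem.List.pyGetD_natCast, PySem.List.pyGetD_natCast]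
        refine ⟨by rw [List.length_set]; exact ihl, fun b hb => ?_⟩
        rw [pvGetD_set]
        by_cases hbm : b = m + 1
        · subst hbm
          rw [if_pos ⟨rfl, by omega⟩, if_pos (le_refl _)]
          rw [ihv (m + 1) hb, if_neg (by omega), ihv m (by omega), if_pos (le_refl _)]
          rw [pvS_succ k L (m + 1), pvS_succ k L m]
          push_cast
          ring
        · rw [if_neg (by tauto), ihv b hb]
          by_cases hble : b ≤ m
          · rw [if_pos hble, if_pos (by omega)]
          · rw [if_neg hble, if_neg (by omega)]
  have h51 : (PySem.List.pyRange 0 51 : List Int) = (List.range 51).map (fun (j : Nat) => (j : Int)) := by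
    rw [show (51 : Int) = ((51 : Nat) : Int) from by norm_num, PySem.List.pyRange_zero_nat]
  rw [h51, List.foldl_map]
  exact ⟨(main 51 (le_refl _)).1, fun b hb => by
    rw [(main 51 (le_refl _)).2 b hb, if_pos (by omega)]⟩


-- one step of A's backward placement pass (the body of its third loop)
def pvStepA (k : Int) (st : List String × List Int) (item : String) : List String × List Int :=
  let letter := pvLetter k item
  let p := PySem.List.pyGetD st.2 letter 0 - 1
  (PySem.List.pySetD st.1 p item, PySem.List.pySetD st.2 letter p)

-- backward placement pass, as a foldr over the processed list
lemma pvPlace (k : Int) (n : Nat) :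
    ∀ (M : List String) (aux : List String) (fr : List Int) (lo hi : Nat → Nat),
      fr.length = 52 → aux.length = n →
      (∀ s ∈ M, pvOkChar k s = true) →
      (∀ b, b < 52 → fr.getD b 0 = (hi b : Int)) →
      (∀ b, b < 52 → lo b + (pvF k b M).length = hi b) →
      (∀ b b', b < b' → b' < 52 → hi b ≤ lo b') →
      (∀ b, b < 52 → hi b ≤ n) →
      (M.foldr (fun item st => pvStepA k st item) (aux, fr)).1.length = n ∧
      (M.foldr (fun item st => pvStepA k st item) (aux, fr)).2.length = 52 ∧
      (∀ b, b < 52 →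
        (M.foldr (fun item st => pvStepA k st item) (aux, fr)).2.getD b 0 = (lo b : Int)) ∧
      (∀ b i, b < 52 → i < (pvF k b M).length →
        (M.foldr (fun item st => pvStepA k st item) (aux, fr)).1.getD (lo b + i) ""
          = (pvF k b M).getD i "") ∧
      (∀ p, p < n → (∀ b, b < 52 → ¬(lo b ≤ p ∧ p < hi b)) →
        (M.foldr (fun item st => pvStepA k st item) (aux, fr)).1.getD p "" = aux.getD p "") := by
  intro M
  induction M with
  | nil =>
      intro aux fr lo hi hfr haux _ hg hlohi _ _
      refine ⟨haux, hfr, fun b hb => ?_, fun b i hb hi' => ?_, fun p _ _ => rfl⟩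
      · simp only [List.foldr_nil]
        rw [hg b hb]
        have h := hlohi b hb
        simp [pvF] at h
        omega
      · simp [pvF] at hi'
  | cons x M ih =>
      intro aux fr lo hi hfr haux hok hg hlohi hdisj hn
      have hokx : pvOkChar k x = true := hok x (List.mem_cons_self)
      have hr := pvOk_range hokx
      have hbx : pvB k x < 52 := pvB_lt k x
      have hFx : pvF k (pvB k x) (x :: M) = x :: pvF k (pvB k x) M := by
        unfold pvF; rw [List.filter_cons]; simp
      have hFne : ∀ b, ¬ b = pvB k x → pvF k b (x :: M) = pvF k b M := by
        intro b hb; unfold pvF; rw [List.filter_cons]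
        have hfalse : (pvB k x == b) = false := by
          simp only [beq_eq_false_iff_ne, ne_eq]
          omega
        rw [hfalse]
        simp
      have hlt : lo (pvB k x) < hi (pvB k x) := by
        have h := hlohi (pvB k x) hbx
        rw [hFx] at h
        simp only [List.length_cons] at h
        omega
      have hlon : lo (pvB k x) < n := by
        have := hn (pvB k x) hbx
        omega
      obtain ⟨ih1, ih2, ih3, ih4, ih5⟩ := ih aux fr
          (fun b => if b = pvB k x then lo b + 1 else lo b) hi hfr haux
          (fun s hs => hok s (List.mem_cons_of_mem _ hs)) hg
          (by
            intro b hb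
            by_cases hbb : b = pvB k x
            · have h := hlohi b hb
              rw [show pvF k b (x :: M) = x :: pvF k b M from by rw [hbb]; exact hFx] at h
              simp only [List.length_cons] at h
              beta_reduce
              rw [if_pos hbb]
              omega
            · beta_reduce
              rw [if_neg hbb, ← hFne b hbb]
              exact hlohi b hb)
          (by
            intro b b' hbb hb'
            have h := hdisj b b' hbb hb'
            by_cases hbb' : b' = pvB k x
            · subst hbb'
              beta_reduce
              rw [if_pos rfl]
              omega
            · beta_reduce
              rw [if_neg hbb']
              exact h)
          hn
      simp only [List.foldr_cons]
      generalize hR : M.foldr (fun item st => pvStepA k st item) (aux, fr) = r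
          at ih1 ih2 ih3 ih4 ih5
      have hp : PySem.List.pyGetD r.2 (pvLetter k x) 0 - 1 = ((lo (pvB k x) : Nat) : Int) := by
        rw [pvGet_bridge r.2 ih2 hr.1 hr.2]
        have hBx : (pvLetter k x % 52).toNat = pvB k x := rfl
        rw [hBx, ih3 (pvB k x) hbx]
        rw [if_pos rfl]
        push_cast
        ring
      have hstep : pvStepA k r x
          = (r.1.set (lo (pvB k x)) x, r.2.set (pvB k x) ((lo (pvB k x) : Nat) : Int)) := by
        simp only [pvStepA]
        rw [hp, PySem.List.pySetD_natCast, pvSet_bridge r.2 ih2 hr.1 hr.2]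
        rfl
      rw [hstep]
      refine ⟨?_, ?_, ?_, ?_, ?_⟩
      · simp [List.length_set, ih1]
      · simp [List.length_set, ih2]
      · intro b hb
        rw [pvGetD_set]
        by_cases hbb : b = pvB k x
        · subst hbb
          rw [if_pos ⟨rfl, by omega⟩]
        · rw [if_neg (by tauto), ih3 b hb]
          simp [hbb]
      · intro b i hb hi'
        by_cases hbb : b = pvB k x
        · subst hbb
          rw [hFx] at hi' ⊢
          match i with
          | 0 =>
              rw [pvGetD_set, if_pos ⟨by omega, by omega⟩]
              rfl
          | (j + 1) =>
              rw [pvGetD_set, if_neg (by omega)]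
              have h4 := ih4 (pvB k x) j hbx (by
                rw [List.length_cons] at hi'
                omega)
              beta_reduce at h4
              rw [if_pos rfl] at h4
              rw [show lo (pvB k x) + (j + 1) = lo (pvB k x) + 1 + j from by omega, h4]
              rw [List.getD_cons_succ]
        · rw [hFne b hbb] at hi' ⊢
          have hne : ¬ lo b + i = lo (pvB k x) := by
            have hbound : lo b + i < hi b := by
              have h := hlohi b hb
              rw [hFne b hbb] at h
              omega
            rcases Nat.lt_or_ge b (pvB k x) with hlt' | hge
            · have := hdisj b (pvB k x) hlt' hbx
              omega
            · have hgt : pvB k x < b := by omega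
              have := hdisj (pvB k x) b hgt hb
              omega
          rw [pvGetD_set, if_neg (by omega)]
          have h4 := ih4 b i hb hi'
          beta_reduce at h4
          rw [if_neg hbb] at h4
          exact h4
      · intro p hp' hout
        have hne : ¬ p = lo (pvB k x) := by
          intro he
          exact hout (pvB k x) hbx (by omega)
        rw [pvGetD_set, if_neg (by omega)]
        apply ih5 p hp'
        intro b hb
        have h := hout b hb
        by_cases hbb : b = pvB k x
        · subst hbb
          rw [if_pos rfl]
          omega
        · beta_reduce
          rw [if_neg hbb]
          exact h


-- one step of B's bucket pass (the body of its loop)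
def pvStepB (k : Int) (bs : List (List String)) (item : String) : List (List String) :=
  let letter := pvLetter k item
  PySem.List.pySetD bs letter (PySem.List.pyGetD bs letter [] ++ [item])

-- bucket pass of B
lemma pvBuckets (k : Int) :
    ∀ (M : List String) (bs : List (List String)), bs.length = 52 →
      (∀ s ∈ M, pvOkChar k s = true) →
      (M.foldl (pvStepB k) bs).length = 52 ∧
      ∀ b, b < 52 →
        (M.foldl (pvStepB k) bs).getD b [] = bs.getD b [] ++ pvF k b M := by
  intro M
  induction M with
  | nil =>
      intro bs hl _
      refine ⟨hl, fun b _ => ?_⟩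
      simp [pvF]
  | cons x M ih =>
      intro bs hl hok
      have hokx : pvOkChar k x = true := hok x (List.mem_cons_self)
      have hr := pvOk_range hokx
      have hblt : pvB k x < 52 := pvB_lt k x
      have hset : pvStepB k bs x = bs.set (pvB k x) (bs.getD (pvB k x) [] ++ [x]) := by
        simp only [pvStepB]
        rw [pvGet_bridge bs hl hr.1 hr.2, pvSet_bridge bs hl hr.1 hr.2]
        rfl
      simp only [List.foldl_cons]
      rw [hset]
      have hl' : (bs.set (pvB k x) (bs.getD (pvB k x) [] ++ [x])).length = 52 := by
        simp [hl]
      obtain ⟨ihl, ihv⟩ := ih _ hl' (fun s hs => hok s (List.mem_cons_of_mem _ hs))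
      refine ⟨ihl, fun b hb => ?_⟩
      rw [ihv b hb, pvGetD_set]
      have hFc : pvF k b (x :: M) = if pvB k x == b then x :: pvF k b M else pvF k b M := by
        unfold pvF
        rw [List.filter_cons]
      rw [hFc]
      by_cases hbx : pvB k x = b
      · subst hbx
        rw [if_pos ⟨rfl, by omega⟩, if_pos (by simp)]
        simp
      · rw [if_neg (by tauto), if_neg (by simp [hbx])]

lemma pvFoldlAppend {α : Type} : ∀ (l : List (List α)) (a : List α),
    l.foldl (fun out b => out ++ b) a = a ++ l.flatten := by
  intro l
  induction l with
  | nil => simp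
  | cons x xs ih => intro a; simp [List.foldl_cons, ih, List.append_assoc]

lemma pvFindInterval (k : Int) (L : List String) :
    ∀ (m : Nat) (p : Nat), p < pvS k L m → ∃ b, b < m ∧ pvS k L b ≤ p ∧ p < pvS k L (b + 1) := by
  intro m
  induction m with
  | zero => intro p hp; simp [pvS] at hp
  | succ m ih =>
      intro p hp
      by_cases h : p < pvS k L m
      · obtain ⟨b, hb, h1, h2⟩ := ih p h
        exact ⟨b, by omega, h1, h2⟩
      · exact ⟨m, by omega, by omega, hp⟩

lemma pvFlatten_length (k : Int) (L : List String) (m : Nat) :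
    (((List.range m).map (fun c => pvF k c L)).flatten).length = pvS k L m := by
  induction m with
  | zero => simp [pvS]
  | succ m ih =>
      rw [List.range_succ, List.map_append, List.flatten_append, List.length_append, ih,
        pvS_succ]
      simp

-- the flattened bucket list: getD at offset pvS b + i is element i of bucket b
lemma pvFlatten_getD (k : Int) (L : List String) :
    ∀ (m : Nat) (b i : Nat), b < m → i < (pvF k b L).length →
      (((List.range m).map (fun c => pvF k c L)).flatten).getD (pvS k L b + i) ""
        = (pvF k b L).getD i "" := by
  intro m
  induction m with
  | zero => intro b i hb _; omega
  | succ m ih =>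
      intro b i hb hi
      rw [List.range_succ, List.map_append, List.flatten_append]
      by_cases hbm : b < m
      · rw [List.getD_append]
        · exact ih b i hbm hi
        · rw [pvFlatten_length]
          have h1 := pvS_succ k L b
          have h2 := pvS_mono k L (show b + 1 ≤ m from hbm)
          omega
      · have hbe : b = m := by omega
        subst hbe
        rw [List.getD_append_right _ _ _ _ (by rw [pvFlatten_length]; omega)]
        rw [pvFlatten_length, Nat.add_sub_cancel_left]
        simp


-- the countdown loop of A is a foldr over L
lemma pvCountdown (L : List String) (g : List String × List Int → String → List String × List Int)
    (init : List String × List Int) :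
    (PySem.List.pyRange ((L.length : Int) - 1) (-1) (-1)).foldl
        (fun st i => g st (PySem.List.pyGetD L i "")) init
      = L.foldr (fun x st => g st x) init := by
  rw [PySem.List.pyRange_neg_one]
  rw [show ((L.length : Int) - 1 - (-1)).toNat = L.length from by omega]
  rw [List.foldl_map]
  rw [PySem.List.foldl_congr_mem _ _
    (fun st j => g st (L.getD (L.length - 1 - j) "")) init
    (by
      intro acc x hx
      have hxl : x < L.length := List.mem_range.mp hx
      have hc : (L.length : Int) - 1 - (x : Int) = ((L.length - 1 - x : Nat) : Int) := by omega
      rw [hc, PySem.List.pyGetD_natCast])]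
  have hmap : (List.range L.length).map (fun j => L.getD (L.length - 1 - j) "") = L.reverse := by
    apply List.ext_getElem
    · simp
    · intro i h1 h2
      simp only [List.getElem_map, List.getElem_range, List.getElem_reverse]
      simp only [List.length_map, List.length_range] at h1
      rw [List.getD_eq_getElem _ _ (by omega)]
  rw [← List.foldl_map, hmap, List.foldl_reverse]


-- ===== VERDICT (by name: the statement is the Claim_ definition above) =====
theorem Radix_word_spec : Claim_equal_Radix_word := by
  intro L n k _ hpre
  obtain ⟨hn, hok⟩ := hpre
  by_cases hlen : n = (L.length : Int)
  case neg =>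
    -- n ≤ 0: A's aux is [] and its placement loop is empty; B's buckets stay empty
    have hneg : n ≤ 0 := by
      rcases hn with h | h
      · exact absurd h hlen
      · exact h
    have hA : Radix_word L n k = [] := by
      simp only [Radix_word]
      rw [PySem.List.pyRange_neg_one_eq_nil (by omega : n - 1 ≤ -1), List.foldl_nil]
      simp [Int.toNat_of_nonpos hneg]
    have hB : Radix_word_alt L n k = [] := by
      simp only [Radix_word_alt]
      rw [PySem.List.pyRange_one_eq_nil (by omega : n ≤ 0), List.foldl_nil, pvFoldlAppend]
      simp
    unfold Spec_Radix_word
    rw [hA, hB]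
  case pos =>
  subst hlen
  unfold Spec_Radix_word
  show (List.foldl (fun st i => pvStepA k st (PySem.List.pyGetD L i ""))
      (List.replicate L.length "",
        (PySem.List.pyRange 0 51).foldl (fun fr i =>
          PySem.List.pySetD fr (i + 1)
            (PySem.List.pyGetD fr (i + 1) 0 + PySem.List.pyGetD fr i 0))
          (L.foldl (fun fr item =>
            let letter := pvLetter k item
            PySem.List.pySetD fr letter (PySem.List.pyGetD fr letter 0 + 1))
            (List.replicate 52 0)))
      (PySem.List.pyRange ((L.length : Int) - 1) (-1) (-1))).1
    = (List.foldl (fun bs i => pvStepB k bs (PySem.List.pyGetD L i ""))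
        (List.replicate 52 []) (PySem.List.pyRange 0 (L.length : Int))).foldl
        (fun out b => out ++ b) []
  rw [pvCountdown L (pvStepA k) _,
    PySem.List.foldl_pyRange_zero_pyGetD' L "" (pvStepB k) (List.replicate 52 [])]
  obtain ⟨hc1, hc2⟩ := pvCount k L (List.replicate 52 0) (by simp) hok
  have hv : ∀ b, b < 52 →
      (L.foldl (fun fr item =>
        let letter := pvLetter k item
        PySem.List.pySetD fr letter (PySem.List.pyGetD fr letter 0 + 1))
        (List.replicate 52 0)).getD b 0 = ((pvF k b L).length : Int) := by
    intro b hb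
    rw [hc2 b hb, List.getD_replicate (0 : Int) hb]
    simp
  obtain ⟨hm1, hm2⟩ := pvCum k L _ hc1 hv
  obtain ⟨hp1, hp2, hp3, hp4, hp5⟩ := pvPlace k L.length L (List.replicate L.length "") _
    (pvS k L) (fun b => pvS k L (b + 1)) hm1 (by simp) hok hm2
    (fun b _ => (pvS_succ k L b).symm)
    (fun b b' hbb _ => pvS_mono k L (by omega))
    (fun b _ => le_trans (pvS_mono k L (by omega)) (le_of_eq (pvS_top k L)))
  obtain ⟨hb1, hb2⟩ := pvBuckets k L (List.replicate 52 []) (by simp) hok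
  have hbk : L.foldl (pvStepB k) (List.replicate 52 [])
      = (List.range 52).map (fun b => pvF k b L) := by
    apply List.ext_getElem
    · rw [hb1]; simp
    · intro i h1 h2
      rw [hb1] at h1
      rw [← List.getD_eq_getElem _ ([] : List String) (by rw [hb1]; exact h1),
        hb2 i h1, List.getD_replicate ([] : List String) h1]
      simp [List.getElem_map, List.getElem_range]
  rw [pvFoldlAppend, hbk, List.nil_append]
  apply List.ext_getElem
  · rw [hp1, pvFlatten_length, pvS_top]
  · intro p h1 h2
    rw [hp1] at h1
    obtain ⟨b, hb, hble, hblt⟩ :=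
      pvFindInterval k L 52 p (by rw [pvS_top]; exact h1)
    have hi' : p - pvS k L b < (pvF k b L).length := by
      have := pvS_succ k L b
      omega
    have h4 := hp4 b (p - pvS k L b) hb hi'
    rw [show pvS k L b + (p - pvS k L b) = p from by omega] at h4
    have h5 := pvFlatten_getD k L 52 b (p - pvS k L b) hb hi'
    rw [show pvS k L b + (p - pvS k L b) = p from by omega] at h5
    rw [← List.getD_eq_getElem _ "" (by rw [hp1]; exact h1),
      ← List.getD_eq_getElem _ "" h2, h4, h5]
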